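-- pv_equiv track=rewrite | github.com/junkim100/EncoderSAE | evaluation/sae_eval.py | add_prefix_to_queries
-- ===== SOURCE A (Python) =====
-- from typing import Any, Dict, Optional
--
-- def add_prefix_to_queries(queries: Dict[str, str], model_name: str) -> Dict[str, str]:
--     """Add model-specific prefix to queries."""
--     lower = model_name.lower()
--     if "e5" in lower or "snowflake-arctic-embed" in lower:
--         return {qid: f"query: {query}" for qid, query in queries.items()}
--     if "qwen" in lower or "gte-qwen" in lower:
--         return {
--             qid: (
--                 "Instruct: Given a web search query, retrieve relevant passages that answer the query\n"
--                 f"Query: {query}"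
--             )
--             for qid, query in queries.items()
--         }
--     if "jina" in lower:
--         return {
--             qid: f"Represent the query for retrieving evidence documents: {query}"
--             for qid, query in queries.items()
--         }
--     if "embeddinggemma" in lower:
--         return {
--             qid: f"task: search result | query: {query}"
--             for qid, query in queries.items()
--         }
--     if model_name == "nvidia/llama-nemotron-embed-1b-v2":
--         return {qid: f"query: {query}" for qid, query in queries.items()}
--     if "mxbai" in lower:
--         return {
--             qid: f"Represent this sentence for searching relevant passages: {query}"
--             for qid, query in queries.items()
--         }
--     return queries
-- ===== SOURCE B (Python) =====
-- _RULES = [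
--     (False, "e5", "query: "),
--     (False, "snowflake-arctic-embed", "query: "),
--     (False, "qwen",
--      "Instruct: Given a web search query, retrieve relevant passages that answer the query\nQuery: "),
--     (False, "jina", "Represent the query for retrieving evidence documents: "),
--     (False, "embeddinggemma", "task: search result | query: "),
--     (True, "nvidia/llama-nemotron-embed-1b-v2", "query: "),
--     (False, "mxbai", "Represent this sentence for searching relevant passages: "),
-- ]
--
--
-- def add_prefix_to_queries(queries, model_name):
--     """Add model-specific prefix to queries.
--
--     Exhaustive backward pass over the rules with last-write-wins (no
--     short-circuit): scanning in reverse priority order, every matching rule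
--     overwrites `prefix`, so the final value is the highest-priority match.
--     """
--     lower = model_name.lower()
--     prefix = None
--     for exact, pattern, pre in reversed(_RULES):
--         if (model_name == pattern) if exact else (pattern in lower):
--             prefix = pre
--     if prefix is None:
--         return queries
--     return dict(zip(queries, (prefix + q for q in queries.values())))
-- ===== Notes on version B (the rewrite author's own statement) =====
-- stated objective: alternative
-- what changed: Instead of A's six-branch short-circuit if-chain each building its own dict comprehension, B makes one exhaustive backward pass over a rule list with last-write-wins overwriting (the final assignment is the highest-priority match, so no break/early return is needed), drops the redundant 'gte-qwen' test, and builds the result once by zipping the keys with a generator of prefixed values.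
import Mathlib
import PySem

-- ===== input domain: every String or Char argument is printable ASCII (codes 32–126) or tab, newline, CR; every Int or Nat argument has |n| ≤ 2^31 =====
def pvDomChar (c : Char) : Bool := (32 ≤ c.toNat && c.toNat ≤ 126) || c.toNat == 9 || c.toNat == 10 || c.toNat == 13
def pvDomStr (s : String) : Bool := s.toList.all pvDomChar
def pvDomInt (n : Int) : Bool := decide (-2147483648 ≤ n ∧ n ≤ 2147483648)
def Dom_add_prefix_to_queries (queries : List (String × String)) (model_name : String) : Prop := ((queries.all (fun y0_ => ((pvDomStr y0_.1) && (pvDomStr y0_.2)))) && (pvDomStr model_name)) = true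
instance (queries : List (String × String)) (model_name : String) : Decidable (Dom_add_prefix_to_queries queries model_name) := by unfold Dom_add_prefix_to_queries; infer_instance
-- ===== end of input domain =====

-- B replaces A's short-circuit if-chain of per-branch comprehensions by one exhaustive backward
-- pass over a rule list with last-write-wins overwriting, plus a single zip-built result; objective: alternative.


-- ===== PORT A =====
-- literal transliteration of A: an if-chain, each branch its own comprehension
def add_prefix_to_queries (queries : List (String × String)) (model_name : String) : List (String × String) :=
  let lower := PySem.Str.lower model_name
  if PySem.Str.isIn "e5" lower || PySem.Str.isIn "snowflake-arctic-embed" lower then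
    queries.map (fun p => (p.1, "query: " ++ p.2))
  else if PySem.Str.isIn "qwen" lower || PySem.Str.isIn "gte-qwen" lower then
    queries.map (fun p => (p.1, "Instruct: Given a web search query, retrieve relevant passages that answer the query\nQuery: " ++ p.2))
  else if PySem.Str.isIn "jina" lower then
    queries.map (fun p => (p.1, "Represent the query for retrieving evidence documents: " ++ p.2))
  else if PySem.Str.isIn "embeddinggemma" lower then
    queries.map (fun p => (p.1, "task: search result | query: " ++ p.2))
  else if model_name == "nvidia/llama-nemotron-embed-1b-v2" then
    queries.map (fun p => (p.1, "query: " ++ p.2))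
  else if PySem.Str.isIn "mxbai" lower then
    queries.map (fun p => (p.1, "Represent this sentence for searching relevant passages: " ++ p.2))
  else queries

-- ===== PORT B =====
-- B's rule list (priority order; the redundant 'gte-qwen' test of A is dropped, subsumed by 'qwen')
def pvRules : List (Bool × String × String) :=
  [ (false, "e5", "query: "),
    (false, "snowflake-arctic-embed", "query: "),
    (false, "qwen", "Instruct: Given a web search query, retrieve relevant passages that answer the query\nQuery: "),
    (false, "jina", "Represent the query for retrieving evidence documents: "),
    (false, "embeddinggemma", "task: search result | query: "),
    (true, "nvidia/llama-nemotron-embed-1b-v2", "query: "),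
    (false, "mxbai", "Represent this sentence for searching relevant passages: ") ]

-- exhaustive backward pass, every match overwrites the accumulator; then one zip-built result
def add_prefix_to_queries_alt (queries : List (String × String)) (model_name : String) : List (String × String) :=
  let lower := PySem.Str.lower model_name
  let pre0 : Option String := pvRules.reverse.foldl
    (fun acc r =>
      if (if r.1 then model_name == r.2.1 else PySem.Str.isIn r.2.1 lower) then some r.2.2 else acc)
    none
  match pre0 with
  | none => queries
  | some pre => List.zip (queries.map Prod.fst) (queries.map (fun p => pre ++ p.2))

-- ===== PRECONDITION & SPEC =====
def Spec_add_prefix_to_queries (queries : List (String × String)) (model_name : String) (out : List (String × String)) : Prop := out = add_prefix_to_queries_alt queries model_name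
instance (queries : List (String × String)) (model_name : String) (out : List (String × String)) : Decidable (Spec_add_prefix_to_queries queries model_name out) := by unfold Spec_add_prefix_to_queries; infer_instance

-- ===== CLAIM (what is proved, stated in full; the proofs are below) =====
def Claim_equal_add_prefix_to_queries : Prop := ∀ (queries : List (String × String)) (model_name : String), Dom_add_prefix_to_queries queries model_name → Spec_add_prefix_to_queries queries model_name (add_prefix_to_queries queries model_name)

-- ===== LEMMAS AND PROOFS =====

-- "gte-qwen" in lower implies "qwen" in lower, so A's second disjunct is redundant
lemma qwen_subsume (lower : List Char) (h : PySem.Chars.isIn ['g', 't', 'e', '-', 'q', 'w', 'e', 'n'] lower = true) :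
    PySem.Chars.isIn ['q', 'w', 'e', 'n'] lower = true := by
  rw [PySem.Chars.isIn_iff_infix] at *
  exact List.IsInfix.trans (by decide) h

-- B's zip of the two mapped copies of `queries` is the single map A performs per branch
lemma zip_map_eq (queries : List (String × String)) (pre : String) :
    List.zip (queries.map Prod.fst) (queries.map (fun p => pre ++ p.2))
      = queries.map (fun p => (p.1, pre ++ p.2)) := by
  rw [List.zip_map']

-- ===== VERDICT (by name: the statement is the Claim_ definition above) =====
theorem add_prefix_to_queries_spec : Claim_equal_add_prefix_to_queries := by
  intro queries model_name _
  unfold Spec_add_prefix_to_queries add_prefix_to_queries add_prefix_to_queries_alt pvRules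
  simp only [List.reverse_cons, List.reverse_nil, List.nil_append, List.cons_append,
    List.foldl_cons, List.foldl_nil, zip_map_eq]
  by_cases h1 : PySem.Chars.isIn ['e', '5'] (PySem.Chars.lower model_name.toList) = true
  · simp [h1]
  · simp only [Bool.not_eq_true] at h1
    by_cases h2 : PySem.Chars.isIn ['s', 'n', 'o', 'w', 'f', 'l', 'a', 'k', 'e', '-', 'a', 'r', 'c', 't', 'i', 'c', '-', 'e', 'm', 'b', 'e', 'd'] (PySem.Chars.lower model_name.toList) = true
    · simp [h1, h2]
    · simp only [Bool.not_eq_true] at h2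
      by_cases h3 : PySem.Chars.isIn ['q', 'w', 'e', 'n'] (PySem.Chars.lower model_name.toList) = true
      · simp [h1, h2, h3]
      · simp only [Bool.not_eq_true] at h3
        have h3' : PySem.Chars.isIn ['g', 't', 'e', '-', 'q', 'w', 'e', 'n'] (PySem.Chars.lower model_name.toList) = false := by
          cases hg : PySem.Chars.isIn ['g', 't', 'e', '-', 'q', 'w', 'e', 'n'] (PySem.Chars.lower model_name.toList)
          · rfl
          · exact (qwen_subsume _ hg).symm.trans h3
        by_cases h4 : PySem.Chars.isIn ['j', 'i', 'n', 'a'] (PySem.Chars.lower model_name.toList) = true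
        · simp [h1, h2, h3, h3', h4]
        · simp only [Bool.not_eq_true] at h4
          by_cases h5 : PySem.Chars.isIn ['e', 'm', 'b', 'e', 'd', 'd', 'i', 'n', 'g', 'g', 'e', 'm', 'm', 'a'] (PySem.Chars.lower model_name.toList) = true
          · simp [h1, h2, h3, h3', h4, h5]
          · simp only [Bool.not_eq_true] at h5
            by_cases h6 : model_name = "nvidia/llama-nemotron-embed-1b-v2"
            · simp [h1, h2, h3, h3', h4, h5]
              simp [h6]
            · have h6' : (model_name == "nvidia/llama-nemotron-embed-1b-v2") = false :=
                beq_eq_false_iff_ne.mpr h6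
              by_cases h7 : PySem.Chars.isIn ['m', 'x', 'b', 'a', 'i'] (PySem.Chars.lower model_name.toList) = true
              · simp [h1, h2, h3, h3', h4, h5, h6, h6', h7]
              · simp only [Bool.not_eq_true] at h7
                simp [h1, h2, h3, h3', h4, h5, h6, h6', h7]
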